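-- pv_equiv track=rewrite | github.com/shaoqisz/snippets_everything | snippets.py | count_leading_spaces
-- ===== SOURCE A (Python) =====
-- def count_leading_spaces(line):
--     count = 0
--     for char in line:
--         if char == ' ':
--             count += 1
--         elif char == '\t':
--             count += 4
--         else:
--             break
--     return count
-- ===== SOURCE B (Python) =====
-- def count_leading_spaces(line):
--     prefix = line[:len(line) - len(line.lstrip(' \t'))]
--     return prefix.count(' ') + 4 * prefix.count('\t')
-- ===== Notes on version B (the rewrite author's own statement) =====
-- stated objective: simpler
-- what changed: Replaces A's single accumulator loop with an early break by isolating the leading ' '/'\t' prefix via lstrip and a slice, then returning prefix.count(' ') + 4*prefix.count('\t').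
import Mathlib
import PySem

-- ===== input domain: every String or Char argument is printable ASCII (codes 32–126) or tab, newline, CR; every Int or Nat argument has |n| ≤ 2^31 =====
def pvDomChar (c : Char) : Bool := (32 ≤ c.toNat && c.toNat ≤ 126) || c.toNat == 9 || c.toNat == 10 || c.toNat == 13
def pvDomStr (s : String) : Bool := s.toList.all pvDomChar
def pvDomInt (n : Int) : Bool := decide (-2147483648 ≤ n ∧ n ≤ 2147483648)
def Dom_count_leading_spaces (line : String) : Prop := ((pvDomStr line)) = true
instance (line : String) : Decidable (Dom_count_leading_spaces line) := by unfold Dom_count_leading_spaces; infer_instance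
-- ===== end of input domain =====

-- B replaces A's accumulator loop with break by a library lstrip that isolates the
-- leading ' '/'\t' prefix and two counting passes over that prefix (objective: simpler).

-- ===== PORT A =====
-- the 'for char in line: … break' loop, as structural recursion over the characters with the accumulator 'count'
def pvCountLoop : List Char → Int → Int
  | [], count => count
  | c :: rest, count =>
    if c = ' ' then pvCountLoop rest (count + 1)
    else if c = '\t' then pvCountLoop rest (count + 4)
    else count

def count_leading_spaces (line : String) : Int := pvCountLoop line.toList 0

-- ===== PORT B =====
-- hand port of line.lstrip(' \t') (no PySem primitive for lstrip with a chars argument):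
-- exact — Python drops the longest leading run of characters belonging to the given set
def pvLstripSpaceTab (s : String) : String :=
  String.ofList (s.toList.dropWhile (fun c => c = ' ' || c = '\t'))

def count_leading_spaces_alt (line : String) : Int :=
  let pfx := PySem.Str.slice line none
      (some (PySem.Str.len line - PySem.Str.len (pvLstripSpaceTab line)))
  (PySem.Str.count pfx " " : Int) + 4 * (PySem.Str.count pfx "\t" : Int)

-- ===== PRECONDITION & SPEC =====
def Spec_count_leading_spaces (line : String) (out : Int) : Prop := out = count_leading_spaces_alt line
instance (line : String) (out : Int) : Decidable (Spec_count_leading_spaces line out) := by unfold Spec_count_leading_spaces; infer_instance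

-- ===== CLAIM (what is proved, stated in full; the proofs are below) =====
def Claim_equal_count_leading_spaces : Prop := ∀ (line : String), Dom_count_leading_spaces line → Spec_count_leading_spaces line (count_leading_spaces line)

-- ===== LEMMAS AND PROOFS =====

-- Python's str.count on a single-character needle is List.count
theorem chars_count_go_single (c : Char) (l : List Char) (fuel acc : Nat)
    (h : l.length ≤ fuel) :
    PySem.Chars.count.go [c] fuel l acc = acc + l.count c := by
  induction l generalizing fuel acc with
  | nil => cases fuel <;> simp [PySem.Chars.count.go]
  | cons x t ih =>
    cases fuel with
    | zero => simp at h
    | succ n =>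
      simp only [List.length_cons, Nat.succ_le_succ_iff] at h
      by_cases hx : x = c
      · subst hx
        simp [PySem.Chars.count.go, List.isPrefixOf, ih _ _ h]
        omega
      · simp [PySem.Chars.count.go, List.isPrefixOf, hx, ih _ _ h,
          Ne.symm hx]

theorem chars_count_single (c : Char) (l : List Char) :
    PySem.Chars.count l [c] = l.count c := by
  simp [PySem.Chars.count, chars_count_go_single c l l.length 0 le_rfl]

-- A's loop computes the two weighted counts over the takeWhile-prefix
theorem pvCountLoop_eq (l : List Char) (a : Int) :
    pvCountLoop l a =
      a + ((l.takeWhile (fun c => c = ' ' || c = '\t')).count ' ' : Int)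
        + 4 * ((l.takeWhile (fun c => c = ' ' || c = '\t')).count '\t' : Int) := by
  induction l generalizing a with
  | nil => simp [pvCountLoop]
  | cons x t ih =>
    by_cases hs : x = ' '
    · subst hs
      simp [pvCountLoop, ih]
      ring
    · by_cases ht : x = '\t'
      · subst ht
        simp [pvCountLoop, hs, ih]
        ring
      · simp [pvCountLoop, hs, ht]

theorem equal_lemma (line : String) :
    count_leading_spaces line = count_leading_spaces_alt line := by
  unfold count_leading_spaces count_leading_spaces_alt pvLstripSpaceTab
  set l := line.toList with hl
  set p : Char → Bool := fun c => c = ' ' || c = '\t' with hp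
  have hlen : (l.takeWhile p).length + (l.dropWhile p).length = l.length := by
    rw [← List.length_append, List.takeWhile_append_dropWhile]
  have hb : PySem.Str.len line - PySem.Str.len (String.ofList (l.dropWhile p))
      = ((l.takeWhile p).length : Int) := by
    simp [PySem.Str.len, ← hl]
    omega
  have hpfx : (PySem.Str.slice line none
      (some (PySem.Str.len line - PySem.Str.len (String.ofList (l.dropWhile p))))).toList
      = l.takeWhile p := by
    rw [hb]
    simp [PySem.Str.toList_slice, PySem.List.slice_to_natCast, ← hl]
    exact (List.prefix_iff_eq_take.mp (List.takeWhile_prefix p)).symm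
  rw [pvCountLoop_eq]
  simp only [PySem.Str.count_eq, hpfx]
  simp [chars_count_single]
  ring

-- ===== VERDICT (by name: the statement is the Claim_ definition above) =====
theorem count_leading_spaces_spec : Claim_equal_count_leading_spaces := by
  intro line _
  exact equal_lemma line
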